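-- pv_equiv track=rewrite | github.com/aconconi/advent-of-code-2023 | aoc2023_day18.py | solve
-- ===== SOURCE A (Python) =====
-- from itertools import pairwise
--
-- MOVES = {"U": (0, -1), "D": (0, +1), "L": (-1, 0), "R": (+1, 0)}
--
-- def move(position: tuple[int, int], direction: str, steps: int) -> tuple[int, int]:
--     x, y = position
--     dx, dy = MOVES[direction]
--     return x + dx * steps, y + dy * steps
--
-- def solve(moves: list[tuple[str, int]]) -> int:
--     # The Shoelace Formula is used to calculate the area of a polygon given
--     # the coordinates of its vertices. Pick's Theorem provides a way to
--     # calculate the area of a lattice polygon (a polygon whose vertices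
--     # have integer coordinates) based on the number of interior lattice points
--     # and the number of lattice points on the boundary.
--
--     current = (0, 0)
--     vertices: list[tuple[int, int]] = [current]
--     for direction, steps in moves:
--         current = move(current, direction, steps)
--         vertices.append(current)
--     return (
--         sum(
--             xa * yb - ya * xb + abs(xb - xa + yb - ya)
--             for (xa, ya), (xb, yb) in pairwise(vertices)
--         )
--         // 2
--         + 1
--     )
-- ===== SOURCE B (Python) =====
-- def solve(moves: list[tuple[str, int]]) -> int:
--     # Green's-theorem line integral: only horizontal moves contribute -y*dx to
--     # the area, plus an x*y endpoint correction for open paths; Pick's theorem.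
--     x = y = 0
--     s = 0
--     perim = 0
--     for direction, steps in moves:
--         if direction == "U":
--             y -= steps
--         elif direction == "D":
--             y += steps
--         elif direction == "L":
--             s += y * steps
--             x -= steps
--         elif direction == "R":
--             s -= y * steps
--             x += steps
--         else:
--             raise KeyError(direction)
--         perim += abs(steps)
--     return (2 * s + x * y + perim) // 2 + 1
-- ===== Notes on version B (the rewrite author's own statement) =====
-- stated objective: alternative
-- what changed: B replaces A's stored vertex list and pairwise shoelace cross-product sum by a Green's-theorem line integral: only horizontal moves accumulate -y*dx, corrected by the endpoint product x*y for open paths, with perimeter and Pick's theorem applied once at the end.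
import Mathlib
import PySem

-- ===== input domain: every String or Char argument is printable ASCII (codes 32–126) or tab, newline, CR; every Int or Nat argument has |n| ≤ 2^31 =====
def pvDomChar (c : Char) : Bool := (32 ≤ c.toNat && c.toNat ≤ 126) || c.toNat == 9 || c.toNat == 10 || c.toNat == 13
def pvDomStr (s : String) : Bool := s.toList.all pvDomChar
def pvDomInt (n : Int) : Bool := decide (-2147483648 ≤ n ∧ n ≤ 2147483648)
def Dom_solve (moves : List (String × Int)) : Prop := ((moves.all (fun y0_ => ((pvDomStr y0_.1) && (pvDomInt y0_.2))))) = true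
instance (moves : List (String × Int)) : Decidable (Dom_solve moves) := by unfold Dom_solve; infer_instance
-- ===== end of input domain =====

-- B replaces A's stored-vertex shoelace cross-product sum by a Green's-theorem
-- integral over horizontal moves only, with an endpoint x*y correction (objective: alternative).

-- ===== PORT A =====
-- MOVES = {"U": (0, -1), "D": (0, +1), "L": (-1, 0), "R": (+1, 0)}
def MOVES : PySem.Dict String (Int × Int) :=
  PySem.Dict.ofList [("U", (0, -1)), ("D", (0, 1)), ("L", (-1, 0)), ("R", (1, 0))]

-- move(position, direction, steps); none = Python's KeyError on an unknown direction
def moveA (position : Int × Int) (direction : String) (steps : Int) : Option (Int × Int) :=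
  match PySem.Dict.get? MOVES direction with
  | some (dx, dy) => some (position.1 + dx * steps, position.2 + dy * steps)
  | none => none

-- the for-loop of A: state (current, vertices); none propagates the KeyError
def loopA : List (String × Int) → (Int × Int) → List (Int × Int) → Option (List (Int × Int))
  | [], _, vertices => some vertices
  | (direction, steps) :: rest, current, vertices =>
    match moveA current direction steps with
    | none => none
    | some nxt => loopA rest nxt (vertices ++ [nxt])

-- sum(xa*yb - ya*xb + abs(xb - xa + yb - ya) for (xa,ya),(xb,yb) in pairwise(vertices))
def pairSum : List (Int × Int) → Int
  | [] => 0
  | [_] => 0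
  | a :: b :: rest => (a.1 * b.2 - a.2 * b.1 + |b.1 - a.1 + b.2 - a.2|) + pairSum (b :: rest)

def solve (moves : List (String × Int)) : Int :=
  match loopA moves (0, 0) [(0, 0)] with
  | some vertices => PySem.Int.floordiv (pairSum vertices) 2 + 1
  | none => 0  -- Python raises KeyError here; excluded by Pre_solve

-- ===== PORT B =====
-- the single loop of Source B: state (x, y, s, perim); none = the explicit `raise KeyError`
def loopB : List (String × Int) → Int → Int → Int → Int → Option (Int × Int × Int × Int)
  | [], x, y, s, p => some (x, y, s, p)
  | (direction, steps) :: rest, x, y, s, p =>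
    if direction == "U" then loopB rest x (y - steps) s (p + |steps|)
    else if direction == "D" then loopB rest x (y + steps) s (p + |steps|)
    else if direction == "L" then loopB rest (x - steps) y (s + y * steps) (p + |steps|)
    else if direction == "R" then loopB rest (x + steps) y (s - y * steps) (p + |steps|)
    else none

def solve_alt (moves : List (String × Int)) : Int :=
  match loopB moves 0 0 0 0 with
  | some (x, y, s, p) => PySem.Int.floordiv (2 * s + x * y + p) 2 + 1
  | none => 0  -- Source B raises KeyError here; excluded by Pre_solve

-- ===== PRECONDITION & SPEC =====
-- Pre_ excludes moves with a direction outside {"U","D","L","R"}, on which both A and B raise KeyError.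
def Pre_solve (moves : List (String × Int)) : Prop :=
  ∀ m ∈ moves, m.1 = "U" ∨ m.1 = "D" ∨ m.1 = "L" ∨ m.1 = "R"
instance (moves : List (String × Int)) : Decidable (Pre_solve moves) := by unfold Pre_solve; infer_instance

def pvWitness_solve : (List (String × Int)) := [("R", 3), ("D", 2), ("L", 3), ("U", 2)]

def Spec_solve (moves : List (String × Int)) (out : Int) : Prop := out = solve_alt moves
instance (moves : List (String × Int)) (out : Int) : Decidable (Spec_solve moves out) := by unfold Spec_solve; infer_instance

-- ===== CLAIM (what is proved, stated in full; the proofs are below) =====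
def Claim_equal_solve : Prop := ∀ (moves : List (String × Int)), Dom_solve moves → Pre_solve moves → Spec_solve moves (solve moves)

-- ===== LEMMAS AND PROOFS =====

lemma moves_get_U : PySem.Dict.get? MOVES "U" = some (0, -1) := by decide
lemma moves_get_D : PySem.Dict.get? MOVES "D" = some (0, 1) := by decide
lemma moves_get_L : PySem.Dict.get? MOVES "L" = some (-1, 0) := by decide
lemma moves_get_R : PySem.Dict.get? MOVES "R" = some (1, 0) := by decide

lemma moves_get_none (d : String) (h1 : d ≠ "U") (h2 : d ≠ "D") (h3 : d ≠ "L") (h4 : d ≠ "R") :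
    PySem.Dict.get? MOVES d = none := by
  have hM : MOVES = PySem.Dict.mk [("U", (0, -1)), ("D", (0, 1)), ("L", (-1, 0)), ("R", (1, 0))] := by decide
  rw [hM]
  simp [PySem.Dict.get?, beq_iff_eq, Ne.symm h1, Ne.symm h2, Ne.symm h3, Ne.symm h4]

-- appending one vertex adds exactly one pairwise term
lemma pairSum_snoc (l : List (Int × Int)) (pt q : Int × Int) :
    pairSum (l ++ [pt, q]) =
      pairSum (l ++ [pt]) + (pt.1 * q.2 - pt.2 * q.1 + |q.1 - pt.1 + q.2 - pt.2|) := by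
  induction l with
  | nil => simp [pairSum]
  | cons a l ih =>
    cases l with
    | nil => simp [pairSum]
    | cons b l' =>
      simp only [List.cons_append, pairSum] at *
      omega

-- the loop invariant, as a predicate on B's state and A's vertex list
def LoopInv (moves : List (String × Int)) (x y : Int) (vs : List (Int × Int)) (s p : Int) : Prop :=
    match loopB moves x y s p with
    | none => loopA moves (x, y) (vs ++ [(x, y)]) = none
    | some (x', y', s', p') => ∃ verts, loopA moves (x, y) (vs ++ [(x, y)]) = some verts ∧
        pairSum verts = pairSum (vs ++ [(x, y)]) + 2 * (s' - s) + (x' * y' - x * y) + (p' - p)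

-- one step of the loop preserves LoopInv, given the per-direction algebraic identity hT
lemma Inv_step (rest : List (String × Int)) (x y x2 y2 s s2 p n : Int) (vs : List (Int × Int))
    (hT : x * y2 - y * x2 + |x2 - x + y2 - y| = 2 * (s2 - s) + (x2 * y2 - x * y) + |n|)
    (ih : LoopInv rest x2 y2 (vs ++ [(x, y)]) s2 (p + |n|)) :
    match loopB rest x2 y2 s2 (p + |n|) with
    | none => loopA rest (x2, y2) ((vs ++ [(x, y)]) ++ [(x2, y2)]) = none
    | some (x', y', s', p') => ∃ verts,
        loopA rest (x2, y2) ((vs ++ [(x, y)]) ++ [(x2, y2)]) = some verts ∧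
        pairSum verts = pairSum (vs ++ [(x, y)]) + 2 * (s' - s) + (x' * y' - x * y) + (p' - p) := by
  unfold LoopInv at ih
  cases hB : loopB rest x2 y2 s2 (p + |n|) with
  | none => rw [hB] at ih; exact ih
  | some q =>
    obtain ⟨x', y', s', p'⟩ := q
    rw [hB] at ih
    obtain ⟨verts, hv, hsum⟩ := ih
    refine ⟨verts, hv, ?_⟩
    rw [hsum]
    have hps := pairSum_snoc vs (x, y) (x2, y2)
    rw [show (vs ++ [(x, y)]) ++ [(x2, y2)] = vs ++ [(x, y), (x2, y2)] from by simp, hps]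
    simp only at hT ⊢
    linarith [hT]

lemma key (moves : List (String × Int)) :
    ∀ (x y : Int) (vs : List (Int × Int)) (s p : Int), LoopInv moves x y vs s p := by
  induction moves with
  | nil =>
    intro x y vs s p
    exact ⟨vs ++ [(x, y)], rfl, by ring⟩
  | cons m rest ih =>
    intro x y vs s p
    obtain ⟨d, n⟩ := m
    by_cases h1 : d = "U"
    · subst h1
      have hBv : loopB (("U", n) :: rest) x y s p = loopB rest x (y - n) s (p + |n|) := rfl
      have hA : loopA (("U", n) :: rest) (x, y) (vs ++ [(x, y)])
          = loopA rest (x, y - n) ((vs ++ [(x, y)]) ++ [(x, y - n)]) := by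
        simp only [loopA, moveA, moves_get_U]
        rw [show ((x + 0 * n, y + (-1) * n) : Int × Int) = (x, y - n) from by
          simp only [Prod.mk.injEq]; constructor <;> ring]
      unfold LoopInv
      rw [hBv, hA]
      refine Inv_step rest x y x (y - n) s s p n vs ?_ (ih x (y - n) (vs ++ [(x, y)]) s (p + |n|))
      rw [show x - x + (y - n) - y = -n from by ring, abs_neg]; ring
    · by_cases h2 : d = "D"
      · subst h2
        have hBv : loopB (("D", n) :: rest) x y s p = loopB rest x (y + n) s (p + |n|) := rfl
        have hA : loopA (("D", n) :: rest) (x, y) (vs ++ [(x, y)])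
            = loopA rest (x, y + n) ((vs ++ [(x, y)]) ++ [(x, y + n)]) := by
          simp only [loopA, moveA, moves_get_D]
          rw [show ((x + 0 * n, y + 1 * n) : Int × Int) = (x, y + n) from by
            simp only [Prod.mk.injEq]; constructor <;> ring]
        unfold LoopInv
        rw [hBv, hA]
        refine Inv_step rest x y x (y + n) s s p n vs ?_ (ih x (y + n) (vs ++ [(x, y)]) s (p + |n|))
        rw [show x - x + (y + n) - y = n from by ring]; ring
      · by_cases h3 : d = "L"
        · subst h3
          have hBv : loopB (("L", n) :: rest) x y s p
              = loopB rest (x - n) y (s + y * n) (p + |n|) := rfl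
          have hA : loopA (("L", n) :: rest) (x, y) (vs ++ [(x, y)])
              = loopA rest (x - n, y) ((vs ++ [(x, y)]) ++ [(x - n, y)]) := by
            simp only [loopA, moveA, moves_get_L]
            rw [show ((x + (-1) * n, y + 0 * n) : Int × Int) = (x - n, y) from by
              simp only [Prod.mk.injEq]; constructor <;> ring]
          unfold LoopInv
          rw [hBv, hA]
          refine Inv_step rest x y (x - n) y s (s + y * n) p n vs ?_
            (ih (x - n) y (vs ++ [(x, y)]) (s + y * n) (p + |n|))
          rw [show x - n - x + y - y = -n from by ring, abs_neg]; ring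
        · by_cases h4 : d = "R"
          · subst h4
            have hBv : loopB (("R", n) :: rest) x y s p
                = loopB rest (x + n) y (s - y * n) (p + |n|) := rfl
            have hA : loopA (("R", n) :: rest) (x, y) (vs ++ [(x, y)])
                = loopA rest (x + n, y) ((vs ++ [(x, y)]) ++ [(x + n, y)]) := by
              simp only [loopA, moveA, moves_get_R]
              rw [show ((x + 1 * n, y + 0 * n) : Int × Int) = (x + n, y) from by
                simp only [Prod.mk.injEq]; constructor <;> ring]
            unfold LoopInv
            rw [hBv, hA]
            refine Inv_step rest x y (x + n) y s (s - y * n) p n vs ?_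
              (ih (x + n) y (vs ++ [(x, y)]) (s - y * n) (p + |n|))
            rw [show x + n - x + y - y = n from by ring]; ring
          · unfold LoopInv
            simp only [loopB, loopA, moveA, moves_get_none d h1 h2 h3 h4,
              beq_iff_eq, h1, h2, h3, h4, if_false]

-- ===== VERDICT (by name: the statement is the Claim_ definition above) =====
theorem solve_spec : Claim_equal_solve := by
  intro moves _ _
  unfold Spec_solve solve solve_alt
  have h := key moves 0 0 [] 0 0
  unfold LoopInv at h
  simp only [List.nil_append] at h
  cases hB : loopB moves 0 0 0 0 with
  | none => rw [hB] at h; rw [h]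
  | some q =>
    obtain ⟨x, y, s, p⟩ := q
    rw [hB] at h
    obtain ⟨verts, hv, hsum⟩ := h
    rw [hv]
    show PySem.Int.floordiv (pairSum verts) 2 + 1 = PySem.Int.floordiv (2 * s + x * y + p) 2 + 1
    rw [hsum]
    norm_num [pairSum]
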